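-- pv_equiv track=rewrite | github.com/cd80-ctf/microcorruption | Level 17 | Chernobyl/hash.py | get_hash
-- ===== SOURCE A (Python) =====
-- def get_hash(string):  # calculates the hash of a string of bytes in the same way the level does
--     ret = 0
--     ret_hex = ""
--     for byte in string:
--         old_hash_plus_byte = ret + byte
--         ret += byte
--         ret_hex = hex(ret)
--         ret *= 32
--         ret_hex = hex(ret)
--         ret -= old_hash_plus_byte
--         ret_hex = hex(ret)
--
--     return ret, ret_hex
-- ===== SOURCE B (Python) =====
-- def get_hash(string):  # direct polynomial evaluation, back to front, instead of Horner folding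
--     ret = 0
--     power = 31
--     for byte in reversed(string):
--         ret += byte * power
--         power *= 31
--     return ret, (hex(ret) if string else "")
-- ===== Notes on version B (the rewrite author's own statement) =====
-- stated objective: faster
-- what changed: Replaces Horner's forward fold (which rebuilds hex(ret) three times per byte) by direct polynomial evaluation over reversed(string) with an explicit power-of-31 accumulator, formatting the hex string once at the end.
import Mathlib
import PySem

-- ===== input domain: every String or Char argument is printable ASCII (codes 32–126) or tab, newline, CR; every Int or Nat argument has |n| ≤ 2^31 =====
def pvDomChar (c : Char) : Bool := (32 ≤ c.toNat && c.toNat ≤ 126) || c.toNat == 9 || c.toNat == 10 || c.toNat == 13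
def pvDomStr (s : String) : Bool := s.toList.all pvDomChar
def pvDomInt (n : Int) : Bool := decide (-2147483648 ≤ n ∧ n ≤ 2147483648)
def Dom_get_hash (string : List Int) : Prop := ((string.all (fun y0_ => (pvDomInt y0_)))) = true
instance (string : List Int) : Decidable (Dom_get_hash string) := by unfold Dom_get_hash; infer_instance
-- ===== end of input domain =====

-- B replaces A's Horner fold (which re-formats hex(ret) three times per byte) by direct polynomial
-- evaluation over the reversed list with a power accumulator, formatting hex once at the end (faster).


-- Python's hex(): "0x…" lowercase digits, "-0x…" for negatives, "0x0" for zero (exact for all Int)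
def pyHex (n : Int) : String :=
  (if n < 0 then "-0x" else "0x") ++ String.ofList (Nat.toDigits 16 n.natAbs)

-- ===== PORT A =====
def get_hash (string : List Int) : Int × String :=
  string.foldl
    (fun st byte =>
      let ret := st.1
      let old_hash_plus_byte := ret + byte
      let ret := ret + byte
      let _ret_hex := pyHex ret
      let ret := ret * 32
      let _ret_hex := pyHex ret
      let ret := ret - old_hash_plus_byte
      let ret_hex := pyHex ret
      (ret, ret_hex))
    (0, "")

-- ===== PORT B =====
def get_hash_alt (string : List Int) : Int × String :=
  let st := string.reverse.foldl
    (fun st byte => (st.1 + byte * st.2, st.2 * 31)) ((0 : Int), (31 : Int))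
  (st.1, if string.isEmpty then "" else pyHex st.1)

-- ===== PRECONDITION & SPEC =====
def Spec_get_hash (string : List Int) (out : Int × String) : Prop := out = get_hash_alt string
instance (string : List Int) (out : Int × String) : Decidable (Spec_get_hash string out) := by unfold Spec_get_hash; infer_instance

-- ===== CLAIM (what is proved, stated in full; the proofs are below) =====
def Claim_equal_get_hash : Prop := ∀ (string : List Int), Dom_get_hash string → Spec_get_hash string (get_hash string)

-- ===== LEMMAS AND PROOFS =====

-- A's fold on the numeric component only (Horner step)
def stepA (r b : Int) : Int := (r + b) * 32 - (r + b)

def hornA (r : Int) (l : List Int) : Int := l.foldl stepA r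

-- the polynomial Σ m_i · 31^i
def polyP (m : List Int) : Int := m.foldr (fun b acc => b + 31 * acc) 0

theorem polyP_append_singleton (m : List Int) (b : Int) :
    polyP (m ++ [b]) = polyP m + b * 31 ^ m.length := by
  induction m with
  | nil => simp [polyP]
  | cons a t ih => simp [polyP, List.foldr] at ih ⊢; rw [ih]; ring

theorem hornA_eq (l : List Int) : ∀ r : Int,
    hornA r l = 31 ^ l.length * r + 31 * polyP l.reverse := by
  induction l with
  | nil => intro r; simp [hornA, polyP]
  | cons b t ih =>
      intro r
      have h1 : hornA r (b :: t) = hornA (stepA r b) t := rfl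
      rw [h1, ih]
      have h2 : (b :: t).reverse = t.reverse ++ [b] := by simp
      rw [h2, polyP_append_singleton]
      simp [stepA, List.length_reverse]
      ring

theorem foldB_eq (m : List Int) : ∀ r p : Int,
    m.foldl (fun st byte => (st.1 + byte * st.2, st.2 * 31)) (r, p)
      = (r + p * polyP m, p * 31 ^ m.length) := by
  induction m with
  | nil => intro r p; simp [polyP]
  | cons b t ih =>
      intro r p
      simp only [List.foldl, ih, polyP, List.foldr, List.length_cons]
      rw [Prod.mk.injEq]
      constructor
      · ring
      · ring

theorem foldA_eq (l : List Int) : ∀ (r : Int) (s : String),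
    l.foldl
      (fun st byte =>
        let ret := st.1
        let old_hash_plus_byte := ret + byte
        let ret := ret + byte
        let _ret_hex := pyHex ret
        let ret := ret * 32
        let _ret_hex := pyHex ret
        let ret := ret - old_hash_plus_byte
        let ret_hex := pyHex ret
        (ret, ret_hex)) (r, s)
      = (hornA r l, if l.isEmpty then s else pyHex (hornA r l)) := by
  induction l with
  | nil => intro r s; simp [hornA]
  | cons b t ih =>
      intro r s
      have hstep : hornA r (b :: t) = hornA (stepA r b) t := rfl
      simp only [List.foldl, ih, hstep]
      rcases t with _ | ⟨c, u⟩
      · simp [hornA, stepA]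
      · simp [stepA]

theorem get_hash_eq (l : List Int) :
    get_hash l = (hornA 0 l, if l.isEmpty then "" else pyHex (hornA 0 l)) := by
  unfold get_hash
  exact foldA_eq l 0 ""

theorem get_hash_alt_eq (l : List Int) :
    get_hash_alt l = (31 * polyP l.reverse, if l.isEmpty then "" else pyHex (31 * polyP l.reverse)) := by
  unfold get_hash_alt
  rw [foldB_eq]
  simp

-- ===== VERDICT (by name: the statement is the Claim_ definition above) =====
theorem get_hash_spec : Claim_equal_get_hash := by
  intro l _
  unfold Spec_get_hash
  rw [get_hash_eq, get_hash_alt_eq, hornA_eq]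
  simp
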